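-- pv_equiv track=rewrite | github.com/TH3PL4Y3R1/n_back | nback/sequences.py | _valid_run_limit
-- ===== SOURCE A (Python) =====
-- from typing import Dict, List, Optional, Tuple
--
-- def _valid_run_limit(seq: List[str], candidate: str, max_run: int) -> bool:
--     if max_run <= 0:
--         return True
--     run_len = 1
--     i = len(seq) - 1
--     while i >= 0 and seq[i] == candidate:
--         run_len += 1
--         i -= 1
--     return run_len <= max_run
-- ===== SOURCE B (Python) =====
-- def _valid_run_limit(seq, candidate, max_run):
--     if max_run <= 0:
--         return True
--     return not (len(seq) >= max_run and all(x == candidate for x in seq[-max_run:]))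
-- ===== Notes on version B (the rewrite author's own statement) =====
-- stated objective: simpler
-- what changed: Instead of walking backwards counting the trailing run length, B checks the fixed-size trailing window: the append is invalid iff the last max_run elements all equal the candidate.
import Mathlib
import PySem

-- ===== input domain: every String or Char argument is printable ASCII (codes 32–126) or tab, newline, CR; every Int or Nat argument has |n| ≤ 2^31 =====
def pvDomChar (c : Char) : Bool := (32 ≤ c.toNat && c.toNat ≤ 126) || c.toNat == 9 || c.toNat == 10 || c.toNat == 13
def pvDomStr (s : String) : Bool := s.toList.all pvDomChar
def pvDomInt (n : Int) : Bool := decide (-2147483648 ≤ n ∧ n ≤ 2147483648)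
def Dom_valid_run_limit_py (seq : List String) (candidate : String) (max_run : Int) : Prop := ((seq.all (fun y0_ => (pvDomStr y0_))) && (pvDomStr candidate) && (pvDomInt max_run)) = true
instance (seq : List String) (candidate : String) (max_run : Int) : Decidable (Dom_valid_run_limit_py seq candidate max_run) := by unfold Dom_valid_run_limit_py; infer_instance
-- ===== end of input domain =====

-- B replaces A's backward run-counting loop by a fixed-size trailing-window all-equal check (simpler).
-- ===== PORT A =====
-- while i >= 0 and seq[i] == candidate: walk backwards from the end, counting the run
def pvALoop (l : List String) (candidate : String) (run_len : Int) : Int :=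
  match l with
  | [] => run_len
  | x :: xs => if x == candidate then pvALoop xs candidate (run_len + 1) else run_len

def valid_run_limit_py (seq : List String) (candidate : String) (max_run : Int) : Bool :=
  if max_run ≤ 0 then true
  else decide (pvALoop seq.reverse candidate 1 ≤ max_run)

-- ===== PORT B =====
-- B: invalid iff the last max_run elements (seq[-max_run:]) all equal the candidate
def valid_run_limit_py_alt (seq : List String) (candidate : String) (max_run : Int) : Bool :=
  if max_run ≤ 0 then true
  else !(decide ((seq.length : Int) ≥ max_run) &&
         (PySem.List.slice seq (some (-max_run)) none).all (fun x => x == candidate))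

-- ===== PRECONDITION & SPEC =====
def Spec_valid_run_limit_py (seq : List String) (candidate : String) (max_run : Int) (out : Bool) : Prop := out = valid_run_limit_py_alt seq candidate max_run
instance (seq : List String) (candidate : String) (max_run : Int) (out : Bool) : Decidable (Spec_valid_run_limit_py seq candidate max_run out) := by unfold Spec_valid_run_limit_py; infer_instance

-- ===== CLAIM (what is proved, stated in full; the proofs are below) =====
def Claim_equal_valid_run_limit_py : Prop := ∀ (seq : List String) (candidate : String) (max_run : Int), Dom_valid_run_limit_py seq candidate max_run → Spec_valid_run_limit_py seq candidate max_run (valid_run_limit_py seq candidate max_run)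

-- ===== LEMMAS AND PROOFS =====

-- ===== VERDICT (by name: the statement is the Claim_ definition above) =====
lemma pvALoop_eq (l : List String) (c : String) (k : Int) :
    pvALoop l c k = k + ((l.takeWhile (fun x => x == c)).length : Int) := by
  induction l generalizing k with
  | nil => simp [pvALoop]
  | cons x xs ih =>
    by_cases h : (x == c) = true
    · simp [pvALoop, h, ih]; ring
    · simp [pvALoop, h]

lemma take_all_eq_takeWhile (l : List String) (p : String → Bool) (k : Nat) (hk : k ≤ l.length) :
    (l.take k).all p = decide (k ≤ (l.takeWhile p).length) := by
  induction l generalizing k with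
  | nil => simp_all
  | cons x xs ih =>
    cases k with
    | zero => simp
    | succ k =>
      by_cases h : p x = true
      · simp [h, ih k (by simpa using hk)]
      · simp [h]

lemma takeWhile_len_le (l : List String) (p : String → Bool) :
    (l.takeWhile p).length ≤ l.length := by
  induction l with
  | nil => simp
  | cons x xs ih =>
    by_cases h : p x = true
    · simpa [List.takeWhile_cons, h] using ih
    · simp [h]

theorem valid_run_limit_py_spec : Claim_equal_valid_run_limit_py := by
  intro seq candidate max_run _
  unfold Spec_valid_run_limit_py valid_run_limit_py valid_run_limit_py_alt
  by_cases hm : max_run ≤ 0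
  · simp [hm]
  · simp only [hm, if_false]
    have hm' : 0 < max_run := by omega
    set t := (seq.reverse.takeWhile (fun x => x == candidate)).length with ht
    have hA : pvALoop seq.reverse candidate 1 = 1 + (t : Int) := pvALoop_eq _ _ _
    have htlen : t ≤ seq.length := by
      simpa using takeWhile_len_le seq.reverse (fun x => x == candidate)
    by_cases hlen : (seq.length : Int) ≥ max_run
    · have hk : max_run.toNat ≤ seq.length := by omega
      have hslice : PySem.List.slice seq (some (-max_run)) none
          = seq.drop (seq.length - max_run.toNat) := by
        have := PySem.List.slice_from_neg_natCast (xs := seq) (k := max_run.toNat)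
          (by omega)
        simpa [Int.toNat_of_nonneg (le_of_lt hm')] using this
      have hdrop : seq.drop (seq.length - max_run.toNat)
          = (seq.reverse.take max_run.toNat).reverse := by
        rw [List.reverse_take]; simp
      have hall : (PySem.List.slice seq (some (-max_run)) none).all (fun x => x == candidate)
          = decide (max_run.toNat ≤ t) := by
        rw [hslice, hdrop, List.all_reverse,
          take_all_eq_takeWhile _ _ _ (by simpa using hk)]
      rw [hA, hall]
      by_cases hkt : max_run.toNat ≤ t
      · simp only [hlen, hkt, decide_true, Bool.true_and, Bool.not_true, decide_eq_false_iff_not]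
        omega
      · simp only [hlen, decide_true, Bool.true_and]
        have h2 : decide (max_run.toNat ≤ t) = false := by simpa using hkt
        simp only [h2, Bool.not_false, decide_eq_true_eq]
        omega
    · have h1 : decide ((seq.length : Int) ≥ max_run) = false := by simpa using hlen
      rw [hA]
      simp only [ge_iff_le, h1, Bool.false_and, Bool.not_false, decide_eq_true_eq]
      omega
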